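-- pv_equiv track=rewrite | github.com/class-euproject/trajectory-prediction | tp/v3TP.py | compute_maxmin_coord
-- ===== SOURCE A (Python) =====
-- from collections import deque
--
-- def compute_maxmin_coord(coord, assoc_coord):
--
--     max1 = max(coord)
--     maxi = [i for i, j in enumerate(coord) if j == max1]
--     max_assoc_coord = deque()
--     for i in maxi: max_assoc_coord.append(assoc_coord[i])
--     max2 = max(max_assoc_coord)
--
--     min1 = min(coord)
--     mini = [i for i, j in enumerate(coord) if j == min1]
--     min_assoc_coord = deque()
--     for i in mini: min_assoc_coord.append(assoc_coord[i])
--     min2 = min(min_assoc_coord)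
--
--     return max1, max2, min1, min2
-- ===== SOURCE B (Python) =====
-- def compute_maxmin_coord(coord, assoc_coord):
--     max1 = max(coord)
--     min1 = min(coord)
--     max2 = None
--     min2 = None
--     for i, c in enumerate(coord):
--         if c == max1:
--             a = assoc_coord[i]
--             max2 = a if max2 is None or max2 < a else max2
--         if c == min1:
--             a = assoc_coord[i]
--             min2 = a if min2 is None or a < min2 else min2
--     return max1, max2, min1, min2
-- ===== Notes on version B (the rewrite author's own statement) =====
-- stated objective: simpler
-- what changed: Replaces the two phases of index-comprehension + deque-building + max/min over the deque with a single fused enumerate scan that folds the associated values into running max2/min2 accumulators.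
import Mathlib
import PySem

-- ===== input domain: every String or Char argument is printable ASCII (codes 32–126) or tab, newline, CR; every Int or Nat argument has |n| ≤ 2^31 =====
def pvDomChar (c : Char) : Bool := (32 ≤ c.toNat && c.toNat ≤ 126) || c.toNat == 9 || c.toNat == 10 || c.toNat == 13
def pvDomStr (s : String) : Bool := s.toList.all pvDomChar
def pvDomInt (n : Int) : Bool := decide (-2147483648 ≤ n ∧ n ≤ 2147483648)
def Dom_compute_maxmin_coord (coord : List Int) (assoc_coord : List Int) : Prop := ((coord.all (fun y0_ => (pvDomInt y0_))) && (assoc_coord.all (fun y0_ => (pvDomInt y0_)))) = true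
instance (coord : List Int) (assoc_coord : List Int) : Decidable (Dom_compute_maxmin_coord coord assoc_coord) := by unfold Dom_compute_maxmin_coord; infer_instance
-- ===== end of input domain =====

-- B fuses A's two phases (index comprehension + deque + max/min over it) into one enumerate scan
-- with running max2/min2 accumulators; objective: simpler (same asymptotic cost).


-- ===== PORT A =====
def compute_maxmin_coord (coord : List Int) (assoc_coord : List Int) : Int × Int × Int × Int :=
  let max1 := (PySem.List.max? coord id).getD 0
  let maxi := ((PySem.List.enumerate coord).filter (fun p => p.2 == max1)).map (fun p => p.1)
  let max_assoc_coord := maxi.foldl (fun acc i => acc ++ [PySem.List.pyGetD assoc_coord i 0]) []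
  let max2 := (PySem.List.max? max_assoc_coord id).getD 0
  let min1 := (PySem.List.min? coord id).getD 0
  let mini := ((PySem.List.enumerate coord).filter (fun p => p.2 == min1)).map (fun p => p.1)
  let min_assoc_coord := mini.foldl (fun acc i => acc ++ [PySem.List.pyGetD assoc_coord i 0]) []
  let min2 := (PySem.List.min? min_assoc_coord id).getD 0
  (max1, max2, min1, min2)

-- ===== PORT B =====
-- 'max2 = a if max2 is None or max2 < a else max2' for the current (i, c) when c == max1
def altStepMax (max1 : Int) (assoc_coord : List Int) (st : Option Int) (p : Int × Int) : Option Int :=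
  if p.2 == max1 then
    let a := PySem.List.pyGetD assoc_coord p.1 0
    match st with
    | none => some a
    | some m => if m < a then some a else some m
  else st

-- 'min2 = a if min2 is None or a < min2 else min2' for the current (i, c) when c == min1
def altStepMin (min1 : Int) (assoc_coord : List Int) (st : Option Int) (p : Int × Int) : Option Int :=
  if p.2 == min1 then
    let a := PySem.List.pyGetD assoc_coord p.1 0
    match st with
    | none => some a
    | some m => if a < m then some a else some m
  else st

def compute_maxmin_coord_alt (coord : List Int) (assoc_coord : List Int) : Int × Int × Int × Int :=
  let max1 := (PySem.List.max? coord id).getD 0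
  let min1 := (PySem.List.min? coord id).getD 0
  let st := (PySem.List.enumerate coord).foldl
    (fun (st : Option Int × Option Int) p =>
      (altStepMax max1 assoc_coord st.1 p, altStepMin min1 assoc_coord st.2 p))
    (none, none)
  (max1, st.1.getD 0, min1, st.2.getD 0)

-- ===== PRECONDITION & SPEC =====
-- Pre_ excludes exactly where Python A raises: empty coord (ValueError from max) and
-- extremal positions of coord that have no partner in assoc_coord (IndexError).
def Pre_compute_maxmin_coord (coord : List Int) (assoc_coord : List Int) : Prop :=
  coord ≠ [] ∧ ∀ i, i < coord.length →
    ((∀ x ∈ coord, x ≤ coord.getD i 0) ∨ (∀ x ∈ coord, coord.getD i 0 ≤ x)) →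
    i < assoc_coord.length
instance (coord : List Int) (assoc_coord : List Int) : Decidable (Pre_compute_maxmin_coord coord assoc_coord) := by unfold Pre_compute_maxmin_coord; infer_instance

def pvWitness_compute_maxmin_coord : List Int × List Int := ([1, 2, 1], [5, 7, 6])

def Spec_compute_maxmin_coord (coord : List Int) (assoc_coord : List Int) (out : Int × Int × Int × Int) : Prop := out = compute_maxmin_coord_alt coord assoc_coord
instance (coord : List Int) (assoc_coord : List Int) (out : Int × Int × Int × Int) : Decidable (Spec_compute_maxmin_coord coord assoc_coord out) := by unfold Spec_compute_maxmin_coord; infer_instance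

-- ===== CLAIM (what is proved, stated in full; the proofs are below) =====
def Claim_equal_compute_maxmin_coord : Prop := ∀ (coord : List Int) (assoc_coord : List Int), Dom_compute_maxmin_coord coord assoc_coord → Pre_compute_maxmin_coord coord assoc_coord → Spec_compute_maxmin_coord coord assoc_coord (compute_maxmin_coord coord assoc_coord)

-- ===== LEMMAS AND PROOFS =====

-- a pair-state fold with independent components splits into two folds
theorem pair_foldl {α β γ : Type} (f : β → α → β) (g : γ → α → γ) :
    ∀ (l : List α) (s1 : β) (s2 : γ),
      l.foldl (fun st p => (f st.1 p, g st.2 p)) (s1, s2) = (l.foldl f s1, l.foldl g s2) := by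
  intro l
  induction l with
  | nil => intro s1 s2; rfl
  | cons x t ih => intro s1 s2; simp only [List.foldl_cons]; exact ih _ _

-- the accumulator steps of PySem.List.max?/min? at key = id, as named functions
def maxStep (acc : Option Int) (x : Int) : Option Int :=
  match acc with
  | none => some x
  | some m => if m < x then some x else some m

def minStep (acc : Option Int) (x : Int) : Option Int :=
  match acc with
  | none => some x
  | some m => if x < m then some x else some m

theorem max?_eq_foldl (xs : List Int) : PySem.List.max? xs id = xs.foldl maxStep none := by
  simp only [PySem.List.max?, id_eq]
  congr 1
  funext acc x
  cases acc <;> rfl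

theorem min?_eq_foldl (xs : List Int) : PySem.List.min? xs id = xs.foldl minStep none := by
  simp only [PySem.List.min?, id_eq]
  congr 1
  funext acc x
  cases acc <;> rfl

-- B's guarded max accumulator over a list = the plain max fold over the filtered, looked-up values
theorem foldl_altMax (m : Int) (a : List Int) :
    ∀ (l : List (Int × Int)) (st : Option Int),
      l.foldl (altStepMax m a) st
        = ((l.filter (fun p => p.2 == m)).map (fun p => PySem.List.pyGetD a p.1 0)).foldl maxStep st := by
  intro l
  induction l with
  | nil => intro st; rfl
  | cons x t ih =>
    intro st
    by_cases h : x.2 == m <;> simp [altStepMax, maxStep, h, ih]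

theorem foldl_altMin (m : Int) (a : List Int) :
    ∀ (l : List (Int × Int)) (st : Option Int),
      l.foldl (altStepMin m a) st
        = ((l.filter (fun p => p.2 == m)).map (fun p => PySem.List.pyGetD a p.1 0)).foldl minStep st := by
  intro l
  induction l with
  | nil => intro st; rfl
  | cons x t ih =>
    intro st
    by_cases h : x.2 == m <;> simp [altStepMin, minStep, h, ih]

-- ===== VERDICT (by name: the statement is the Claim_ definition above) =====
theorem compute_maxmin_coord_spec : Claim_equal_compute_maxmin_coord := by
  intro coord assoc_coord _ _
  unfold Spec_compute_maxmin_coord compute_maxmin_coord compute_maxmin_coord_alt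
  dsimp only
  rw [pair_foldl]
  simp only [foldl_altMax, foldl_altMin, PySem.List.foldl_append_singleton_eq_map,
    List.nil_append, List.map_map, max?_eq_foldl, min?_eq_foldl, Function.comp_def]
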